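-- pv_equiv track=rewrite | github.com/CMLXMENCE/E-Book-Analysis-in-Python | E-Book Analysis in Python.py | symbols_Clean
-- ===== SOURCE A (Python) =====
-- def symbols_Clean(all_words):
--     no_symbol=[]
--     symbols=",.é!'^+%&/()=?_<>£#$½{[]}\|@-*:;æß"+"1234567890"+chr(775)+chr(34)#symbols and numbers i want removed
--     for word_ in all_words:
--         for symbol in symbols:
--             if symbol in word_:
--                 symbol_index=word_.index(symbol)
--                 word_=word_.replace(symbol,"")#I wanted to put a space instead of the removed symbol
--                 word_=word_[0:symbol_index]
--         if (len(word_)>0):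
--             no_symbol.append(word_)#I added the new word to a file
--     return no_symbol
-- ===== SOURCE B (Python) =====
-- def symbols_Clean(all_words):
--     # One left-to-right scan per word: keep the maximal prefix of characters
--     # that are not in the symbol set, append it when non-empty.
--     symbols = ",.é!'^+%&/()=?_<>£#$½{[]}\|@-*:;æß" + "1234567890" + chr(775) + chr(34)
--     symbol_set = set(symbols)
--     no_symbol = []
--     for word in all_words:
--         i = 0
--         n = len(word)
--         while i < n and word[i] not in symbol_set:
--             i += 1
--         if i:
--             no_symbol.append(word[:i])
--     return no_symbol
-- ===== Notes on version B (the rewrite author's own statement) =====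
-- stated objective: faster
-- what changed: B replaces A's per-symbol loop of find/replace-all/slice passes over each word by a single left-to-right scan that stops at the first symbol-set character and keeps that prefix.
import Mathlib
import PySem

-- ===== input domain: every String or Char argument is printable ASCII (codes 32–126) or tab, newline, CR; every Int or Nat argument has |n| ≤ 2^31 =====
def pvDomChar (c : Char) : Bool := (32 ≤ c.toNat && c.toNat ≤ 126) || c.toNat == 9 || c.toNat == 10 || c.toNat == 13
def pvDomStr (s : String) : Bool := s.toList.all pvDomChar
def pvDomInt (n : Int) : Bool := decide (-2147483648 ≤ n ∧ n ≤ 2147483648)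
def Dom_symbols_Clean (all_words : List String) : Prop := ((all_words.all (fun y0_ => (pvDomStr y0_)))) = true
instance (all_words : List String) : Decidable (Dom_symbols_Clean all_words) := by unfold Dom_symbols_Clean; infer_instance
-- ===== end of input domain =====

set_option maxRecDepth 8192


-- B replaces A's per-symbol find/replace/slice loop by a single left-to-right scan per word
-- that keeps the maximal prefix of non-symbol characters (objective: faster, O(|word|+|symbols|)
-- per word instead of O(|symbols|·|word|)).

-- the symbols string both Pythons build: ",.é!'^+%&/()=?_<>£#$½{[]}\|@-*:;æß" + "1234567890" + chr(775) + chr(34)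
def pvSymbols : String := ",.é!'^+%&/()=?_<>£#$½{[]}\\|@-*:;æß" ++ "1234567890" ++ "\u0307" ++ "\""

-- ===== PORT A =====
def symbols_Clean (all_words : List String) : List String :=
  all_words.foldl (fun no_symbol word0 =>
    let word_ := pvSymbols.toList.foldl (fun word_ symbol =>
      if PySem.Str.isIn (String.singleton symbol) word_ then
        -- word_.index(symbol): guarded by `symbol in word_`, so str.index = Str.find here
        let symbol_index := PySem.Str.find word_ (String.singleton symbol)
        let word_ := PySem.Str.replace word_ (String.singleton symbol) ""
        PySem.Str.slice word_ (some 0) (some symbol_index)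
      else word_) word0
    if 0 < PySem.Str.len word_ then no_symbol ++ [word_] else no_symbol) []

-- ===== PORT B =====
-- Source B's while-loop advances i over the maximal run of characters not in the symbol set and
-- takes word[:i]; that scan is List.takeWhile.
def symbols_Clean_alt (all_words : List String) : List String :=
  let symbolSet : PySem.Set Char := PySem.Set.ofList pvSymbols.toList
  all_words.foldl (fun no_symbol word =>
    let pre := word.toList.takeWhile (fun c => !(symbolSet.contains c))
    if pre.length ≠ 0 then no_symbol ++ [String.ofList pre] else no_symbol) []

-- ===== PRECONDITION & SPEC =====
def Spec_symbols_Clean (all_words : List String) (out : List String) : Prop := out = symbols_Clean_alt all_words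
instance (all_words : List String) (out : List String) : Decidable (Spec_symbols_Clean all_words out) := by unfold Spec_symbols_Clean; infer_instance

-- ===== CLAIM (what is proved, stated in full; the proofs are below) =====
def Claim_equal_symbols_Clean : Prop := ∀ (all_words : List String), Dom_symbols_Clean all_words → Spec_symbols_Clean all_words (symbols_Clean all_words)

-- ===== LEMMAS AND PROOFS =====

-- A's inner loop body, on the List Char side
def pvStep (w : List Char) (s : Char) : List Char :=
  if PySem.Chars.isIn [s] w then
    (PySem.Chars.replace w [s] []).take (PySem.Chars.find w [s]).toNat
  else w

theorem pv_go_single (s : Char) : ∀ (l : List Char) (fuel : Nat) (acc : List Char), l.length ≤ fuel →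
    PySem.Chars.replace.go [s] [] fuel l acc = acc.reverse ++ l.filter (fun c => !(c == s))
  | [], fuel, acc, _ => by cases fuel <;> simp [PySem.Chars.replace.go]
  | c :: t, fuel+1, acc, h => by
    rw [PySem.Chars.replace.go]
    by_cases hc : c = s
    · rw [if_pos (by simp [hc])]
      rw [show List.drop [s].length (c :: t) = t from by simp]
      rw [show ([] : List Char).reverse ++ acc = acc from by simp,
          pv_go_single s t fuel acc (by simpa using h)]
      simp [hc]
    · rw [if_neg (by simp; exact fun h' => hc h'.symm)]
      rw [pv_go_single s t fuel (c :: acc) (by simpa using h)]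
      simp [hc]

theorem pv_replace_single (s : Char) (u : List Char) :
    PySem.Chars.replace u [s] [] = u.filter (fun c => !(c == s)) := by
  rw [PySem.Chars.replace]
  simp only [List.isEmpty_cons]
  rw [if_neg (by simp), pv_go_single s u u.length [] le_rfl]
  simp

theorem pv_takeWhile_ne_eq_take (s : Char) : ∀ (u : List Char) (i : Nat), u[i]? = some s →
    (∀ j, j < i → u[j]? ≠ some s) → u.takeWhile (fun c => !(c == s)) = u.take i
  | [], i, hi, _ => by simp at hi
  | c :: t, 0, hi, _ => by simp at hi; simp [hi]
  | c :: t, i+1, hi, hlt => by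
    have hc : c ≠ s := by have := hlt 0 (by omega); simpa using this
    simp only [List.takeWhile_cons, List.take_succ_cons]
    rw [if_pos (by simp [hc])]
    rw [pv_takeWhile_ne_eq_take s t i (by simpa using hi)
        (fun j hj => by simpa using hlt (j+1) (by omega))]

theorem pv_filter_take (s : Char) : ∀ (u : List Char) (i : Nat),
    (∀ j, j < i → u[j]? ≠ some s) → (u.filter (fun c => !(c == s))).take i = u.take i
  | _, 0, _ => by simp
  | [], _+1, _ => by simp
  | c :: t, i+1, hlt => by
    have hc : c ≠ s := by have := hlt 0 (by omega); simpa using this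
    simp only [List.filter_cons]
    rw [if_pos (by simp [hc])]
    simp only [List.take_succ_cons]
    rw [pv_filter_take s t i (fun j hj => by simpa using hlt (j+1) (by omega))]

-- one pass of A's inner loop, applied to a takeWhile prefix, sharpens the predicate by one symbol
theorem pv_step_takeWhile (p : Char → Bool) (w : List Char) (s : Char) :
    pvStep (w.takeWhile p) s = w.takeWhile (fun c => p c && !(c == s)) := by
  have hsplit : w.takeWhile (fun c => p c && !(c == s))
      = (w.takeWhile p).takeWhile (fun c => !(c == s)) := by
    rw [List.takeWhile_takeWhile]
    congr 1
    funext c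
    by_cases hp : p c <;> by_cases hcs : c = s <;> simp [hp, hcs]
  set u := w.takeWhile p with hu
  by_cases hmem : s ∈ u
  · have hinf : [s] <:+: u := (List.singleton_infix_iff s u).mpr hmem
    have hIn : PySem.Chars.isIn [s] u = true := (PySem.Chars.isIn_iff_infix _ _).mpr hinf
    have h0 : 0 ≤ PySem.Chars.find u [s] := (PySem.Chars.find_nonneg_iff _ _).mpr hinf
    obtain ⟨hpre, hmin⟩ := PySem.Chars.find_spec h0
    set i := (PySem.Chars.find u [s]).toNat with hi
    have hgi : u[i]? = some s := by
      rcases List.prefix_iff_eq_take.mp hpre with h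
      have : (u.drop i).head? = some s := by
        rcases hd : u.drop i with _ | ⟨a, r⟩
        · rw [hd] at hpre; simp at hpre
        · rw [hd] at hpre
          rcases hpre with ⟨r', hr'⟩
          simp at hr'
          simp [hr'.1]
      rwa [List.head?_drop] at this
    have hglt : ∀ j, j < i → u[j]? ≠ some s := by
      intro j hj hjs
      apply hmin j hj
      have : (u.drop j).head? = some s := by rwa [List.head?_drop]
      rcases hd : u.drop j with _ | ⟨a, r⟩
      · rw [hd] at this; simp at this
      · rw [hd] at this; simp at this
        exact ⟨r, by simp [this]⟩
    rw [hsplit, pvStep, if_pos hIn, pv_replace_single, pv_filter_take s u i hglt,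
        pv_takeWhile_ne_eq_take s u i hgi hglt]
  · have hIn : PySem.Chars.isIn [s] u = false :=
      (PySem.Chars.isIn_eq_false_iff _ _).mpr (fun hinf => hmem ((List.singleton_infix_iff s u).mp hinf))
    rw [hsplit, pvStep, if_neg (by simp [hIn])]
    exact (List.takeWhile_eq_self_iff.mpr (fun a ha => by
      simp only [Bool.not_eq_eq_eq_not, Bool.not_true, beq_eq_false_iff_ne]
      exact fun h => hmem (h ▸ ha))).symm

theorem pv_foldl_step : ∀ (L : List Char) (p : Char → Bool) (w : List Char),
    L.foldl pvStep (w.takeWhile p) = w.takeWhile (fun c => p c && !(L.contains c))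
  | [], p, w => by simp
  | s :: L, p, w => by
    rw [List.foldl_cons, pv_step_takeWhile p w s, pv_foldl_step L _ w]
    congr 1
    funext c
    by_cases hp : p c <;> by_cases hcs : c = s <;> simp [hp, hcs]

-- the Str-level inner loop of port A computes pvStep on the character lists
theorem pv_strloop (L : List Char) : ∀ (w : String),
    (L.foldl (fun word_ symbol =>
      if PySem.Str.isIn (String.singleton symbol) word_ then
        PySem.Str.slice (PySem.Str.replace word_ (String.singleton symbol) "")
          (some 0) (some (PySem.Str.find word_ (String.singleton symbol)))
      else word_) w).toList = L.foldl pvStep w.toList := by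
  induction L with
  | nil => intro w; simp
  | cons s L ih =>
    intro w
    rw [List.foldl_cons, List.foldl_cons, ih]
    congr 1
    have hbr : PySem.Str.isIn (String.singleton s) w = PySem.Chars.isIn [s] w.toList := by
      simp [PySem.Str.isIn_eq]
    cases hIn : PySem.Chars.isIn [s] w.toList with
    | false =>
      unfold pvStep
      rw [hbr, hIn]
      simp
    | true =>
      have h0 : 0 ≤ PySem.Chars.find w.toList [s] :=
        (PySem.Chars.find_nonneg_iff _ _).mpr ((PySem.Chars.isIn_iff_infix _ _).mp hIn)
      unfold pvStep
      rw [hbr, hIn]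
      simp only [if_true, PySem.Str.toList_slice, PySem.Chars.slice_eq_listSlice,
        PySem.List.slice_zero_start, PySem.Str.toList_replace, PySem.Str.find_eq,
        String.toList_singleton, String.toList_empty]
      rw [PySem.List.slice_to _ h0]

theorem pv_word (w : String) :
    (pvSymbols.toList.foldl (fun word_ symbol =>
      if PySem.Str.isIn (String.singleton symbol) word_ then
        PySem.Str.slice (PySem.Str.replace word_ (String.singleton symbol) "")
          (some 0) (some (PySem.Str.find word_ (String.singleton symbol)))
      else word_) w).toList
    = w.toList.takeWhile (fun c => !((PySem.Set.ofList pvSymbols.toList).contains c)) := by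
  rw [pv_strloop]
  calc pvSymbols.toList.foldl pvStep w.toList
      = pvSymbols.toList.foldl pvStep (w.toList.takeWhile (fun _ => true)) := by
        rw [List.takeWhile_eq_self_iff.mpr (fun x _ => rfl)]
    _ = w.toList.takeWhile (fun c => true && !(pvSymbols.toList.contains c)) :=
        pv_foldl_step _ _ _
    _ = w.toList.takeWhile (fun c => !((PySem.Set.ofList pvSymbols.toList).contains c)) := by
        have hfun : (fun c => true && !(pvSymbols.toList.contains c))
            = (fun c => !((PySem.Set.ofList pvSymbols.toList).contains c)) := by
          funext c
          simp [PySem.Set.mem_ofList]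
        rw [hfun]

-- ===== VERDICT (by name: the statement is the Claim_ definition above) =====
set_option maxHeartbeats 1000000 in
theorem symbols_Clean_spec : Claim_equal_symbols_Clean := by
  intro all_words hdom
  clear hdom
  unfold Spec_symbols_Clean symbols_Clean symbols_Clean_alt
  induction all_words using List.reverseRecOn with
  | nil => simp only [List.foldl_nil]
  | append_singleton ws w ih =>
    rw [List.foldl_append, List.foldl_append, ih]
    simp only [List.foldl_cons, List.foldl_nil]
    have hw := pv_word w
    set pre := w.toList.takeWhile (fun c => !((PySem.Set.ofList pvSymbols.toList).contains c)) with hpre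
    have hW : (pvSymbols.toList.foldl (fun word_ symbol =>
        if PySem.Str.isIn (String.singleton symbol) word_ then
          PySem.Str.slice (PySem.Str.replace word_ (String.singleton symbol) "")
            (some 0) (some (PySem.Str.find word_ (String.singleton symbol)))
        else word_) w) = String.ofList pre :=
      String.toList_injective (by rw [hw, String.toList_ofList])
    rw [hW, if_congr (by rw [PySem.Str.len_eq, String.toList_ofList, Int.natCast_pos,
      Nat.pos_iff_ne_zero]) rfl rfl]
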